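-- pv_equiv track=rewrite | github.com/Togohogo1/Programming-Problems | CCC/CCC_15_J3_Rövarspråket.py | convert
-- ===== SOURCE A (Python) =====
-- import operator
--
-- def convert(letter, vowels, cons):
--     if letter in cons:
--         a = {}
--         b = []
--
--         vowels = list(map(ord, vowels))
--         cons = list(cons)
--
--         for i in range(len(vowels)):
--             a[vowels[i] - ord(letter)] = abs(vowels[i] - ord(letter))
--
--         a = sorted(a.items(), key=operator.itemgetter(1))
--
--         for i in range(2):
--             b.append(a.pop(0))
--
--         if letter == "z":
--             temp = "z"
--         else:
--             temp = cons[cons.index(letter)+1]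
--
--         return letter + chr(ord(letter) + int(b[0][0])) + temp
--
--     else:
--         return letter
-- ===== SOURCE B (Python) =====
-- def convert(letter, vowels, cons):
--     if letter not in cons:
--         return letter
--     nearest = min(vowels, key=lambda v: abs(ord(v) - ord(letter)))
--     temp = "z" if letter == "z" else cons[cons.index(letter) + 1]
--     return letter + nearest + temp
-- ===== Notes on version B (the rewrite author's own statement) =====
-- stated objective: simpler
-- what changed: B replaces A's pipeline (build a dict of offset->abs-distance, stable-sort its items by distance, pop twice) with a single min() scan over the vowels, and indexes the consonant string directly instead of converting it to a list.
import Mathlib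
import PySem

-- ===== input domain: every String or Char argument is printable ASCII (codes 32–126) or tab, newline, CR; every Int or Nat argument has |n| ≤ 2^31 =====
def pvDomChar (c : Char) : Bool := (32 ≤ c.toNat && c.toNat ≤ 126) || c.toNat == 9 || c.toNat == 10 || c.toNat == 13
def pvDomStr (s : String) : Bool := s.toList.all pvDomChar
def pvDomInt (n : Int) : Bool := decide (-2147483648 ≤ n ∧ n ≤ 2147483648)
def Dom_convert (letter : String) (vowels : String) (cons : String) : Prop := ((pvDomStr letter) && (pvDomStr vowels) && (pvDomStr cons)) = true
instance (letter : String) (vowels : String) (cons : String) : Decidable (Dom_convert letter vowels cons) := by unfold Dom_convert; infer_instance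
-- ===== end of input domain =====

-- B replaces A's build-a-dict / stable-sort / pop pipeline by a single min-scan over the vowels
-- (objective: simpler); equivalence is about the return value only.

-- ===== PORT A =====
def convert (letter : String) (vowels : String) (cons : String) : String :=
  if PySem.Str.isIn letter cons then
    -- ord(letter): Python raises TypeError unless letter has exactly one character (Pre_convert
    -- excludes the rest); headD stands in for that single character.
    let lc : Char := letter.toList.headD ' '
    let lOrd : Int := (lc.toNat : Int)
    let vlist : List Int := vowels.toList.map (fun c => (c.toNat : Int))   -- vowels = list(map(ord, vowels))
    let clist : List Char := cons.toList                                   -- cons = list(cons)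
    let a : PySem.Dict Int Int :=
      (PySem.List.pyRange 0 (PySem.List.len vlist)).foldl
        (fun d i => d.insert (PySem.List.pyGetD vlist i 0 - lOrd) |PySem.List.pyGetD vlist i 0 - lOrd|)
        PySem.Dict.empty
    let aSorted : List (Int × Int) := PySem.List.sorted a.items (fun p => p.2)
    match PySem.List.pop? aSorted 0 with
    | none => ""      -- IndexError: pop from empty list (Pre_convert excludes)
    | some (b0, rest) =>
      match PySem.List.pop? rest 0 with
      | none => ""    -- IndexError on the loop's second pop (Pre_convert excludes)
      | some _ =>
        let temp : String :=
          if letter = "z" then "z"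
          else
            match PySem.List.index? clist lc with
            | none => ""  -- ValueError from cons.index (unreachable when letter is one char of cons)
            | some i =>
              match PySem.List.pyGet? clist ((i : Int) + 1) with
              | some c => String.ofList [c]
              | none => ""  -- IndexError: letter is the last consonant (Pre_convert excludes)
        letter ++ String.ofList [Char.ofNat (lOrd + b0.1).toNat] ++ temp
  else letter

-- ===== PORT B =====
def convert_alt (letter : String) (vowels : String) (cons : String) : String :=
  if PySem.Str.isIn letter cons = false then letter
  else
    -- ord(letter): Python raises TypeError unless letter has exactly one character (Pre_convert excludes)
    let lOrd : Int := ((letter.toList.headD ' ').toNat : Int)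
    -- min(vowels, key=…): Python raises ValueError on empty vowels (Pre_convert excludes the empty case)
    let nearest : Char := PySem.List.minD vowels.toList (fun v => |(v.toNat : Int) - lOrd|) ' '
    let temp : String :=
      if letter = "z" then "z"
      else
        -- cons.index(letter): cannot raise here since letter in cons; find gives the same index
        match PySem.Str.pyGet? cons (PySem.Str.find cons letter + 1) with
        | some c => String.ofList [c]
        | none => ""  -- IndexError: letter is the last consonant (Pre_convert excludes)
    letter ++ String.ofList [nearest] ++ temp

-- ===== PRECONDITION & SPEC =====
-- Pre_convert excludes exactly the inputs on which the Python A raises: when letter occurs in cons,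
-- A needs letter to be a single character (else ord raises TypeError), at least two distinct
-- vowel offsets (else the second a.pop(0) raises IndexError), and — unless letter == "z" — a
-- consonant after letter in cons (else cons[...] raises IndexError).
def Pre_convert (letter : String) (vowels : String) (cons : String) : Prop :=
  PySem.Str.isIn letter cons = true →
    (letter.toList.length = 1 ∧
     2 ≤ (PySem.List.dedup (vowels.toList.map
            (fun v => (v.toNat : Int) - ((letter.toList.headD ' ').toNat : Int)))).length ∧
     (letter = "z" ∨
        (PySem.List.index? cons.toList (letter.toList.headD ' ')).getD 0 + 1 < cons.toList.length))
instance (letter : String) (vowels : String) (cons : String) : Decidable (Pre_convert letter vowels cons) := by unfold Pre_convert; infer_instance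
def pvWitness_convert : String × String × String := ("b", "ae", "bcd")

def Spec_convert (letter : String) (vowels : String) (cons : String) (out : String) : Prop := out = convert_alt letter vowels cons
instance (letter : String) (vowels : String) (cons : String) (out : String) : Decidable (Spec_convert letter vowels cons out) := by unfold Spec_convert; infer_instance

-- ===== CLAIM (what is proved, stated in full; the proofs are below) =====
def Claim_equal_convert : Prop := ∀ (letter : String) (vowels : String) (cons : String), Dom_convert letter vowels cons → Pre_convert letter vowels cons → Spec_convert letter vowels cons (convert letter vowels cons)
-- ===== LEMMAS AND PROOFS =====

theorem pv_min?_append_some {α κ : Type} [LinearOrder κ] {xs : List α} (x : α) {key : α → κ} {m : α}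
    (h : PySem.List.min? xs key = some m) :
    PySem.List.min? (xs ++ [x]) key = some (if key x < key m then x else m) := by
  unfold PySem.List.min? at h ⊢
  rw [List.foldl_append, h]
  simp only [List.foldl_cons, List.foldl_nil]
  split <;> rfl

theorem pv_min?_dedup (xs : List Int) (key : Int → Int) :
    PySem.List.min? (PySem.List.dedup xs) key = PySem.List.min? xs key := by
  induction xs using List.reverseRecOn with
  | nil => rfl
  | append_singleton xs x ih =>
    rw [PySem.List.dedup_eq_ofList, PySem.Set.ofList_append_singleton]
    by_cases hx : x ∈ PySem.Set.ofList xs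
    · rw [PySem.Set.add_of_mem hx]
      have hxm : x ∈ xs := (PySem.Set.mem_ofList xs x).mp hx
      have hne : xs ≠ [] := List.ne_nil_of_mem hxm
      obtain ⟨m, hm⟩ : ∃ m, PySem.List.min? xs key = some m := by
        cases hmm : PySem.List.min? xs key with
        | none => exact absurd ((PySem.List.min?_eq_none_iff xs key).mp hmm) hne
        | some m => exact ⟨m, rfl⟩
      rw [pv_min?_append_some x hm, ← PySem.List.dedup_eq_ofList, ih, hm,
        if_neg (not_lt.mpr (PySem.List.min?_isMin hm x hxm))]
    · rw [PySem.Set.add_of_not_mem hx]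
      cases hmm : PySem.List.min? xs key with
      | none =>
        have : xs = [] := (PySem.List.min?_eq_none_iff xs key).mp hmm
        subst this
        rfl
      | some m =>
        have ihm : PySem.List.min? (PySem.Set.ofList xs) key = some m := by
          rw [← PySem.List.dedup_eq_ofList, ih, hmm]
        rw [pv_min?_append_some x hmm, pv_min?_append_some x ihm]

theorem pv_min?_map {α β κ : Type} [LinearOrder κ] (f : α → β) (xs : List α) (key : β → κ) :
    PySem.List.min? (xs.map f) key = (PySem.List.min? xs (fun a => key (f a))).map f := by
  induction xs using List.reverseRecOn with
  | nil => rfl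
  | append_singleton xs x ih =>
    rw [List.map_append]
    cases hmm : PySem.List.min? xs (fun a => key (f a)) with
    | none =>
      have : xs = [] := (PySem.List.min?_eq_none_iff _ _).mp hmm
      subst this; rfl
    | some m =>
      have hm2 : PySem.List.min? (xs.map f) key = some (f m) := by rw [ih, hmm]; rfl
      rw [List.map_cons, List.map_nil, pv_min?_append_some (f x) hm2,
        pv_min?_append_some x hmm]
      simp only [Option.map_some]
      split <;> rfl

theorem pv_sorted_head {α κ : Type} [LinearOrder κ] (xs : List α) (key : α → κ) :
    (PySem.List.sorted xs key).head? = PySem.List.min? xs key := by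
  induction xs using List.reverseRecOn with
  | nil => rfl
  | append_singleton xs x ih =>
    rw [PySem.List.sorted_eq_foldl_insertBy, List.foldl_append, ← PySem.List.sorted_eq_foldl_insertBy]
    simp only [List.foldl_cons, List.foldl_nil]
    cases hs : PySem.List.sorted xs key with
    | nil =>
      have hxs : xs = [] := (PySem.List.sorted_eq_nil_iff xs key false).mp hs
      subst hxs
      rfl
    | cons y ys =>
      have hmin : PySem.List.min? xs key = some y := by rw [← ih, hs]; rfl
      rw [pv_min?_append_some x hmin, PySem.List.insertBy.eq_def]
      by_cases hlt : key x < key y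
      · simp [hlt]
      · simp [hlt]

theorem pv_dict_items (f : Int → Int) (ks : List Int) (S : List Int) :
    (ks.foldl (fun d k => d.insert k (f k)) (PySem.Dict.mk (S.map (fun k => (k, f k))))).items
      = (ks.foldl PySem.Set.add S).map (fun k => (k, f k)) := by
  induction ks generalizing S with
  | nil => rfl
  | cons k ks ih =>
    simp only [List.foldl_cons]
    have hstep : (PySem.Dict.mk (S.map (fun k => (k, f k)))).insert k (f k)
        = PySem.Dict.mk ((PySem.Set.add S k).map (fun k => (k, f k))) := by
      have hkeys : (PySem.Dict.mk (S.map (fun k => (k, f k)))).keys = S := by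
        simp only [PySem.Dict.keys, List.map_map]
        rw [show ((fun x : Int × Int => x.1) ∘ fun k : Int => (k, f k)) = id from rfl, List.map_id]
      by_cases hk : k ∈ S
      · have hc : (PySem.Dict.mk (S.map (fun k => (k, f k)))).contains k = true := by
          rw [PySem.Dict.contains_eq_decide_mem_keys, hkeys]; simpa
        rw [PySem.Set.add_of_mem hk]
        apply PySem.Dict.ext
        rw [PySem.Dict.items_insert_of_contains _ _ hc]
        simp only [List.map_map]
        apply List.map_congr_left
        intro a _
        by_cases hak : a = k
        · subst hak; simp
        · simp [Function.comp, hak]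
      · have hc : (PySem.Dict.mk (S.map (fun k => (k, f k)))).contains k = false := by
          rw [PySem.Dict.contains_eq_decide_mem_keys, hkeys]; simpa
        rw [PySem.Set.add_of_not_mem hk]
        apply PySem.Dict.ext
        rw [PySem.Dict.items_insert_of_not_contains _ _ hc]
        simp
    rw [hstep, ih]

theorem pv_singleton_prefix (c : Char) (t : List Char) : [c] <+: t ↔ t.head? = some c := by
  cases t with
  | nil => simp
  | cons a t => simp [List.cons_prefix_cons, eq_comm]

theorem pv_find_singleton {l : List Char} {c : Char} {i : Nat}
    (h : PySem.List.index? l c = some i) : PySem.Chars.find l [c] = (i : Int) := by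
  obtain ⟨pre, suf, hdecomp, hlen, hnotin⟩ := (PySem.List.index?_eq_some_iff l c i).mp h
  have hmem : c ∈ l := by rw [hdecomp]; simp
  have hnn : 0 ≤ PySem.Chars.find l [c] := by
    rw [PySem.Chars.find_nonneg_iff]
    exact ⟨pre, suf, by simp [hdecomp]⟩
  obtain ⟨hpref, hleast⟩ := PySem.Chars.find_spec hnn
  have hgets : ∀ j : Nat, l[j]? = some c ↔ [c] <+: l.drop j := by
    intro j; rw [pv_singleton_prefix, List.head?_drop]
  have hli : l[i]? = some c := by
    rw [hdecomp, ← hlen]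
    rw [List.getElem?_append_right (le_refl pre.length)]
    simp
  have hlj : ∀ j < i, l[j]? ≠ some c := by
    intro j hj
    rw [hdecomp, List.getElem?_append_left (by omega)]
    intro hc
    exact hnotin (List.mem_of_getElem? hc)
  have : (PySem.Chars.find l [c]).toNat = i := by
    by_contra hne
    rcases Nat.lt_or_ge (PySem.Chars.find l [c]).toNat i with hlt | hge
    · exact hlj _ hlt ((hgets _).mpr hpref)
    · exact hleast i (by omega) ((hgets i).mp hli)
  omega

theorem pv_len_one (l : List Char) (h : l.length = 1) : l = [l.headD ' '] := by
  cases l with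
  | nil => simp at h
  | cons a t => cases t with
    | nil => rfl
    | cons b t => simp at h

-- ===== VERDICT (by name: the statement is the Claim_ definition above) =====
theorem convert_spec : Claim_equal_convert := by
  intro letter vowels cons _ hpre
  unfold Spec_convert
  by_cases hin : PySem.Str.isIn letter cons = true
  · simp only [convert, convert_alt, hin, Bool.true_eq_false, if_true, if_false]
    obtain ⟨hlen, hded, htemp⟩ := hpre hin
    have hlet : letter.toList = [letter.toList.headD ' '] := pv_len_one _ hlen
    set lc : Char := letter.toList.headD ' ' with hlc
    set lOrd : Int := (lc.toNat : Int) with hlOrd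
    set vlist : List Int := vowels.toList.map (fun c => (c.toNat : Int)) with hvlist
    set offs : List Int := vowels.toList.map (fun v => (v.toNat : Int) - lOrd) with hoffs
    have hoffs2 : vlist.map (fun v => v - lOrd) = offs := by
      rw [hvlist, List.map_map]; rfl
    -- the dict-building loop produces the distinct offsets, each paired with its absolute value
    have hloop : (List.foldl
        (fun d i => PySem.Dict.insert d (PySem.List.pyGetD vlist i 0 - lOrd) |PySem.List.pyGetD vlist i 0 - lOrd|)
        PySem.Dict.empty (PySem.List.pyRange 0 (PySem.List.len vlist))).items
        = (PySem.List.dedup offs).map (fun k => (k, |k|)) := by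
      rw [PySem.List.foldl_pyRange_pyGetD vlist 0
        (fun d v => PySem.Dict.insert d (v - lOrd) |v - lOrd|) PySem.Dict.empty (le_refl 0)]
      simp only [Int.toNat_zero, List.drop_zero]
      have h1 : List.foldl (fun d v => PySem.Dict.insert d (v - lOrd) |v - lOrd|)
          PySem.Dict.empty vlist
          = List.foldl (fun d k => PySem.Dict.insert d k |k|) PySem.Dict.empty
            (vlist.map (fun v => v - lOrd)) := by
        simp only [List.foldl_map]
      rw [h1, hoffs2]
      have h2 := pv_dict_items (fun k => |k|) offs []
      simp only [List.map_nil] at h2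
      rw [show (PySem.Dict.empty : PySem.Dict Int Int) = PySem.Dict.mk [] from rfl, h2,
        PySem.List.dedup_eq_ofList, PySem.Set.ofList_eq_foldl]
    rw [hloop]
    -- the vowels are nonempty, so min() returns the first vowel with minimal distance
    have hvne : vowels.toList ≠ [] := by
      intro hnil
      rw [hnil] at hoffs
      simp [hoffs, PySem.List.dedup_eq_ofList, PySem.Set.ofList_eq_foldl] at hded
    obtain ⟨c₀, hc₀⟩ : ∃ c₀, PySem.List.min? vowels.toList
        (fun v => |(v.toNat : Int) - lOrd|) = some c₀ := by
      cases hmm : PySem.List.min? vowels.toList (fun v => |(v.toNat : Int) - lOrd|) with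
      | none => exact absurd ((PySem.List.min?_eq_none_iff _ _).mp hmm) hvne
      | some m => exact ⟨m, rfl⟩
    -- head of the stably sorted items = first pair with minimal absolute offset
    have e2 : PySem.List.min? ((PySem.List.dedup offs).map (fun k => (k, |k|))) (fun p => p.2)
        = (PySem.List.min? (PySem.List.dedup offs) (fun k : Int => |k|)).map (fun k => (k, |k|)) :=
      pv_min?_map _ _ _
    have e4 : PySem.List.min? offs (fun k : Int => |k|)
        = (PySem.List.min? vowels.toList (fun v => |(v.toNat : Int) - lOrd|)).map
            (fun v => (v.toNat : Int) - lOrd) := by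
      rw [hoffs]; exact pv_min?_map _ _ _
    have hhead : (PySem.List.sorted ((PySem.List.dedup offs).map (fun k => (k, |k|)))
        (fun p => p.2)).head? = some ((c₀.toNat : Int) - lOrd, |(c₀.toNat : Int) - lOrd|) := by
      rw [pv_sorted_head, e2, pv_min?_dedup, e4, hc₀]
      rfl
    -- ≥ 2 distinct offsets, so both pops succeed
    have hlen2 : 2 ≤ (PySem.List.sorted ((PySem.List.dedup offs).map (fun k => (k, |k|)))
        (fun p => p.2)).length := by
      rw [PySem.List.length_sorted, List.length_map]; exact hded
    obtain ⟨p, q, t, hsort⟩ : ∃ p q t, PySem.List.sorted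
        ((PySem.List.dedup offs).map (fun k => (k, |k|))) (fun p => p.2) = p :: q :: t := by
      cases hs : PySem.List.sorted ((PySem.List.dedup offs).map (fun k => (k, |k|)))
          (fun p => p.2) with
      | nil => rw [hs] at hlen2; simp at hlen2
      | cons p rest =>
        cases rest with
        | nil => rw [hs] at hlen2; simp at hlen2
        | cons q t => exact ⟨p, q, t, rfl⟩
    have hp : p = ((c₀.toNat : Int) - lOrd, |(c₀.toNat : Int) - lOrd|) := by
      rw [hsort] at hhead
      simpa using hhead
    rw [hsort]
    simp only [PySem.List.pop?_zero_cons]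
    have hnear : PySem.List.minD vowels.toList (fun v => |(v.toNat : Int) - lOrd|) ' ' = c₀ := by
      rw [PySem.List.minD, hc₀]; rfl
    rw [hnear]
    have hchr : Char.ofNat (lOrd + p.1).toNat = c₀ := by
      rw [hp]
      have : lOrd + ((c₀.toNat : Int) - lOrd) = (c₀.toNat : Int) := by ring
      rw [this, Int.toNat_natCast, Char.ofNat_toNat]
    rw [hchr]
    -- the following consonant is the same on both sides
    have hmemc : lc ∈ cons.toList := by
      have hinf : letter.toList <:+: cons.toList := (PySem.Str.isIn_iff_infix _ _).mp hin
      rw [hlet] at hinf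
      exact hinf.subset (List.mem_singleton.mpr rfl)
    obtain ⟨i, hi⟩ : ∃ i, PySem.List.index? cons.toList lc = some i := by
      cases hii : PySem.List.index? cons.toList lc with
      | none => exact absurd hmemc ((PySem.List.index?_eq_none_iff _ _).mp hii)
      | some j => exact ⟨j, rfl⟩
    have hfind : PySem.Str.find cons letter = (i : Int) := by
      rw [PySem.Str.find_eq, hlet]
      exact pv_find_singleton hi
    rw [hi, hfind]
    rw [show PySem.Str.pyGet? cons ((i : Int) + 1)
        = PySem.List.pyGet? cons.toList ((i : Int) + 1) from by
      rw [PySem.Str.pyGet?_eq, PySem.Chars.pyGet?_eq_listPyGet?]]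
  · have hin' : PySem.Str.isIn letter cons = false := by
      cases h : PySem.Str.isIn letter cons
      · rfl
      · exact absurd h hin
    simp only [convert, convert_alt, hin', Bool.false_eq_true, if_true, if_false]
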